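-- pv_equiv track=rewrite | github.com/gvellut/piqopiqo | src/piqopiqo/main_window.py | _pick_next_path_in_loop
-- ===== SOURCE A (Python) =====
-- def _pick_next_path_in_loop(
--
--     loop_paths: list[str],
--     valid_paths: set[str],
--     current_path: str | None,
-- ) -> str | None:
--     if not loop_paths:
--         return None
--     if current_path not in loop_paths:
--         for path in loop_paths:
--             if path in valid_paths:
--                 return path
--         return None
--
--     start = loop_paths.index(current_path)
--     for offset in range(1, len(loop_paths) + 1):
--         path = loop_paths[(start + offset) % len(loop_paths)]
--         if path in valid_paths:
--             return path
--     return None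
-- ===== SOURCE B (Python) =====
-- def _pick_next_path_in_loop(
--     loop_paths: list[str],
--     valid_paths: set[str],
--     current_path: str | None,
-- ) -> str | None:
--     n = len(loop_paths)
--     valid_idx = [i for i, p in enumerate(loop_paths) if p in valid_paths]
--     if not valid_idx:
--         return None
--     if current_path in loop_paths:
--         start = loop_paths.index(current_path)
--         best = min(valid_idx, key=lambda i: (i - start - 1) % n)
--         return loop_paths[best]
--     return loop_paths[valid_idx[0]]
-- ===== Notes on version B (the rewrite author's own statement) =====
-- stated objective: alternative
-- what changed: Instead of A's cyclic modulo-index scan (plus a separate linear-scan branch), B collects the indices of all valid paths in one enumerate pass and then selects the answer arithmetically as the arg-min of the cyclic distance (i - start - 1) % n (or the first collected index when current is absent); no scan in rotated order is performed.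
import Mathlib
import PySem

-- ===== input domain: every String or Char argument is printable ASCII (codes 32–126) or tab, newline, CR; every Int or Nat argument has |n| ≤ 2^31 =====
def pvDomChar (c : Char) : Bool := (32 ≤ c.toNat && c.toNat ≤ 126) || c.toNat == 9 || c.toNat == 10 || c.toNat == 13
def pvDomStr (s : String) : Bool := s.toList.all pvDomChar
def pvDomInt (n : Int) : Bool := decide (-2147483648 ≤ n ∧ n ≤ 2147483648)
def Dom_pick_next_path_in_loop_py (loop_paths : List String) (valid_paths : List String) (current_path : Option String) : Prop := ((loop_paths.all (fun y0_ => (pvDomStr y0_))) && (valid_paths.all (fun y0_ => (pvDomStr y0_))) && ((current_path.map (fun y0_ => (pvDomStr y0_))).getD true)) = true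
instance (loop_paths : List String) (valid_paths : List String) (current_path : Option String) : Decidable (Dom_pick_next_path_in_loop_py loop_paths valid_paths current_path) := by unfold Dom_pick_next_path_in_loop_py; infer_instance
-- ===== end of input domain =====

-- B replaces A's cyclic modulo-index scan (and its separate non-member linear-scan branch) by one
-- enumerate pass collecting the indices of valid paths, then an arg-min over cyclic distance
-- (objective: alternative, same asymptotic cost).

-- ===== PORT A =====
-- 'for path in loop_paths: if path in valid_paths: return path; return None'
def pvAFirst (valid_paths : List String) : List String → Option String
  | [] => none
  | p :: rest => if valid_paths.contains p then some p else pvAFirst valid_paths rest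

-- 'for offset in range(1, len+1): path = loop_paths[(start+offset) % len]; if path in valid_paths: return path'
def pvAScan (loop_paths valid_paths : List String) (start : Int) : List Int → Option String
  | [] => none
  | o :: rest =>
    match PySem.List.pyGet? loop_paths (PySem.Int.mod (start + o) loop_paths.length) with
    | none => none  -- IndexError (unreachable: the index is reduced mod the nonzero length)
    | some p => if valid_paths.contains p then some p else pvAScan loop_paths valid_paths start rest

def pick_next_path_in_loop_py (loop_paths : List String) (valid_paths : List String) (current_path : Option String) : Option String :=
  if loop_paths = [] then none
  else if ((current_path.map loop_paths.contains).getD false) = false then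
    pvAFirst valid_paths loop_paths
  else
    match current_path with
    | none => none  -- unreachable: membership above forces current_path = some _
    | some c =>
      match PySem.List.index? loop_paths c with
      | none => none  -- unreachable ValueError
      | some start =>
        pvAScan loop_paths valid_paths (start : Int)
          (PySem.List.pyRange 1 ((loop_paths.length : Int) + 1) 1)

-- ===== PORT B =====
-- 'valid_idx = [i for i, p in enumerate(loop_paths) if p in valid_paths]'
def pvVidx (loop_paths valid_paths : List String) : List Int :=
  ((PySem.List.enumerate loop_paths 0).filter (fun p => valid_paths.contains p.2)).map (fun p => p.1)

def pick_next_path_in_loop_py_alt (loop_paths : List String) (valid_paths : List String) (current_path : Option String) : Option String :=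
  let valid_idx := pvVidx loop_paths valid_paths
  if valid_idx = [] then none
  else if ((current_path.map loop_paths.contains).getD false) then
    match current_path with
    | none => none  -- unreachable: membership forces current_path = some _
    | some c =>
      match PySem.List.index? loop_paths c with
      | none => none  -- unreachable ValueError
      | some start =>
        match PySem.List.min? valid_idx
            (fun i => PySem.Int.mod (i - (start : Int) - 1) (loop_paths.length : Int)) with
        | none => none  -- unreachable: valid_idx ≠ []
        | some best => PySem.List.pyGet? loop_paths best
  else
    match valid_idx.head? with
    | none => none  -- unreachable: valid_idx ≠ []
    | some i => PySem.List.pyGet? loop_paths i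

-- ===== PRECONDITION & SPEC =====
def Spec_pick_next_path_in_loop_py (loop_paths : List String) (valid_paths : List String) (current_path : Option String) (out : Option String) : Prop := out = pick_next_path_in_loop_py_alt loop_paths valid_paths current_path
instance (loop_paths : List String) (valid_paths : List String) (current_path : Option String) (out : Option String) : Decidable (Spec_pick_next_path_in_loop_py loop_paths valid_paths current_path out) := by unfold Spec_pick_next_path_in_loop_py; infer_instance

-- ===== CLAIM (what is proved, stated in full; the proofs are below) =====
def Claim_equal_pick_next_path_in_loop_py : Prop := ∀ (loop_paths : List String) (valid_paths : List String) (current_path : Option String), Dom_pick_next_path_in_loop_py loop_paths valid_paths current_path → Spec_pick_next_path_in_loop_py loop_paths valid_paths current_path (pick_next_path_in_loop_py loop_paths valid_paths current_path)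

-- ===== LEMMAS AND PROOFS =====

theorem pvAFirst_eq_find (vp : List String) (l : List String) :
    pvAFirst vp l = l.find? (fun p => vp.contains p) := by
  induction l with
  | nil => rfl
  | cons x xs ih =>
    by_cases h : x ∈ vp
    · simp [pvAFirst, h]
    · simp [pvAFirst, h, ih]

-- A's cyclic scan from offset 1+j equals a first-match pass over the rotated list minus its first j elements
theorem pvScan_rot (l vp : List String) (i : Nat) (hi : i < l.length) :
    ∀ j, j ≤ l.length →
      pvAScan l vp (i : Int) (PySem.List.pyRange (1 + (j : Int)) ((l.length : Int) + 1) 1)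
        = ((l.drop (i + 1) ++ l.take (i + 1)).drop j).find? (fun p => vp.contains p) := by
  intro j hj
  induction hn : l.length - j generalizing j with
  | zero =>
    have hj' : j = l.length := by omega
    subst hj'
    rw [PySem.List.pyRange_one_eq_nil (by omega)]
    have hlen : (l.drop (i + 1) ++ l.take (i + 1)).length = l.length := by
      simp; omega
    rw [List.drop_eq_nil_of_le hlen.le]
    simp [pvAScan]
  | succ m ih =>
    have hjlt : j < l.length := by omega
    rw [PySem.List.pyRange_one_cons (by omega)]
    simp only [pvAScan]
    have hidx : PySem.Int.mod ((i : Int) + (1 + (j : Int))) (l.length : Int)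
        = (((i + 1 + j) % l.length : Nat) : Int) := by
      have : (i : Int) + (1 + (j : Int)) = ((i + 1 + j : Nat) : Int) := by push_cast; ring
      rw [this, PySem.Int.mod_natCast]
    have hjr : j < (l.drop (i + 1) ++ l.take (i + 1)).length := by
      simp; omega
    have hrot : (l.drop (i + 1) ++ l.take (i + 1))[j]
        = l[(i + 1 + j) % l.length]'(Nat.mod_lt _ (by omega)) := by
      rcases Nat.lt_or_ge j (l.length - (i + 1)) with h | h
      · rw [List.getElem_append_left (by simp; omega)]
        simp only [List.getElem_drop]
        congr 1
        have hm : (i + 1 + j) % l.length = i + 1 + j := Nat.mod_eq_of_lt (by omega)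
        omega
      · rw [List.getElem_append_right (by simp; omega)]
        simp only [List.getElem_take, List.length_drop]
        congr 1
        have hm : (i + 1 + j) % l.length = i + 1 + j - l.length := by
          rw [Nat.mod_eq_sub_mod (by omega), Nat.mod_eq_of_lt (by omega)]
        omega
    rw [hidx, PySem.List.pyGet?_natCast, List.getElem?_eq_getElem (Nat.mod_lt _ (by omega))]
    rw [List.drop_eq_getElem_cons hjr, List.find?_cons, hrot]
    by_cases hv : l[(i + 1 + j) % l.length]'(Nat.mod_lt _ (by omega)) ∈ vp
    · simp [hv]
    · have hstep : (1 : Int) + (j : Int) + 1 = 1 + ((j + 1 : Nat) : Int) := by push_cast; ring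
      rw [hstep, ih (j + 1) (by omega) (by omega)]
      simp [hv]

theorem pvScan_rot0 (l vp : List String) (i : Nat) (hi : i < l.length) :
    pvAScan l vp (i : Int) (PySem.List.pyRange 1 ((l.length : Int) + 1) 1)
      = (l.drop (i + 1) ++ l.take (i + 1)).find? (fun p => vp.contains p) := by
  have h := pvScan_rot l vp i hi 0 (by omega)
  simpa using h

-- find? returns the element at the least index satisfying the predicate
theorem pvFind_of_least {α : Type} (p : α → Bool) :
    ∀ (l : List α) (j : Nat) (hj : j < l.length), p l[j] = true →
      (∀ k (hk : k < l.length), k < j → p l[k] = false) →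
      l.find? p = some l[j] := by
  intro l
  induction l with
  | nil => intro j hj; simp at hj
  | cons x xs ih =>
    intro j hj hpj hmin
    cases j with
    | zero =>
      rw [List.find?_cons]
      simp only [List.getElem_cons_zero] at hpj ⊢
      rw [hpj]
    | succ j' =>
      have hx : p x = false := hmin 0 (by simp) (by omega)
      rw [List.find?_cons, hx]
      exact ih j' (by simpa using hj) (by simpa using hpj)
        (fun k hk hkj => hmin (k + 1) (by simpa using hk) (by omega))

-- membership in B's collected index list
theorem pvMem_vidx (lp vp : List String) (m : Int) :
    m ∈ pvVidx lp vp
      ↔ ∃ (k : Nat) (hk : k < lp.length), m = (k : Int) ∧ vp.contains lp[k] = true := by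
  simp only [pvVidx, List.mem_map, List.mem_filter, PySem.List.mem_enumerate_iff]
  constructor
  · rintro ⟨⟨m', x⟩, ⟨⟨k, hk, hpair⟩, hv⟩, hfst⟩
    rw [Prod.mk.injEq] at hpair
    refine ⟨k, hk, ?_, ?_⟩
    · simp only [← hfst]; simp [hpair.1]
    · rw [← hpair.2]; exact hv
  · rintro ⟨k, hk, rfl, hv⟩
    exact ⟨((0 : Int) + (k : Int), lp[k]), ⟨⟨k, hk, rfl⟩, hv⟩, by simp⟩

theorem pvVidx_pairwise (lp vp : List String) : (pvVidx lp vp).Pairwise (· < ·) := by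
  unfold pvVidx
  exact List.pairwise_map.mpr ((PySem.List.pairwise_lt_enumerate lp 0).filter _)

theorem pvNo_valid (lp vp : List String) (hv0 : pvVidx lp vp = []) :
    ∀ x ∈ lp, x ∉ vp := by
  intro x hx
  obtain ⟨k, hk, rfl⟩ := List.mem_iff_getElem.mp hx
  by_contra hc
  have : (k : Int) ∈ pvVidx lp vp :=
    (pvMem_vidx lp vp k).mpr ⟨k, hk, rfl, by simpa using hc⟩
  simp [hv0] at this

-- the first collected index is the first match of the plain scan
theorem pvHead_branch (lp vp : List String) (m : Int) (t : List Int)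
    (h : pvVidx lp vp = m :: t) :
    lp.find? (fun p => vp.contains p) = PySem.List.pyGet? lp m := by
  have hm : m ∈ pvVidx lp vp := by rw [h]; exact List.mem_cons_self
  obtain ⟨k0, hk0, rfl, hval⟩ := (pvMem_vidx lp vp m).mp hm
  have hmin : ∀ k (hk : k < lp.length), k < k0 → vp.contains lp[k] = false := by
    intro k hk hkk
    by_contra hc
    have hkmem : (k : Int) ∈ pvVidx lp vp :=
      (pvMem_vidx lp vp k).mpr ⟨k, hk, rfl, by simpa using hc⟩
    rw [h] at hkmem
    rcases List.mem_cons.mp hkmem with heq | htl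
    · have : k = k0 := by exact_mod_cast heq
      omega
    · have hpw := pvVidx_pairwise lp vp
      rw [h] at hpw
      have := (List.pairwise_cons.mp hpw).1 _ htl
      have : (k0 : Int) < (k : Int) := this
      have : k0 < k := by exact_mod_cast this
      omega
  rw [pvFind_of_least _ lp k0 hk0 hval hmin]
  rw [PySem.List.pyGet?_natCast, List.getElem?_eq_getElem hk0]

theorem pvRotGet (l : List String) (i j : Nat) (hi : i < l.length) (hj : j < l.length) :
    (l.drop (i + 1) ++ l.take (i + 1))[j]'(by simp; omega)
      = l[(i + 1 + j) % l.length]'(Nat.mod_lt _ (by omega)) := by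
  rcases Nat.lt_or_ge j (l.length - (i + 1)) with h | h
  · rw [List.getElem_append_left (by simp; omega)]
    simp only [List.getElem_drop]
    congr 1
    have hm : (i + 1 + j) % l.length = i + 1 + j := Nat.mod_eq_of_lt (by omega)
    omega
  · rw [List.getElem_append_right (by simp; omega)]
    simp only [List.getElem_take, List.length_drop]
    congr 1
    have hm : (i + 1 + j) % l.length = i + 1 + j - l.length := by
      rw [Nat.mod_eq_sub_mod (by omega), Nat.mod_eq_of_lt (by omega)]
    omega

-- evaluation of B's cyclic-distance key at a natural index
theorem pvKey_eval (n k i : Nat) (hn : i < n) (hk : k < n) :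
    PySem.Int.mod ((k : Int) - (i : Int) - 1) (n : Int)
      = (((k + n - (i + 1)) % n : Nat) : Int) := by
  rw [PySem.Int.mod_eq_emod_of_pos (by omega : (0 : Int) < (n : Int))]
  have h1 : (k : Int) - (i : Int) - 1 = ((k + n - (i + 1) : Nat) : Int) - (n : Int) := by omega
  rw [h1, Int.sub_emod_right]
  push_cast
  rfl

-- the arg-min of the cyclic distance is the first match of the rotated scan
theorem pvMin_branch (lp vp : List String) (i : Nat) (hi : i < lp.length) (b : Int)
    (hb : PySem.List.min? (pvVidx lp vp)
            (fun m => PySem.Int.mod (m - (i : Int) - 1) (lp.length : Int)) = some b) :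
    (lp.drop (i + 1) ++ lp.take (i + 1)).find? (fun p => vp.contains p)
      = PySem.List.pyGet? lp b := by
  have hbmem := PySem.List.min?_mem hb
  obtain ⟨kb, hkb, rfl, hvalb⟩ := (pvMem_vidx lp vp _).mp hbmem
  have hminle := PySem.List.min?_isMin hb
  have hn : 0 < lp.length := by omega
  have hjlt : (kb + lp.length - (i + 1)) % lp.length < lp.length := Nat.mod_lt _ hn
  -- (i+1+jstar) % n = kb
  have hback : (i + 1 + (kb + lp.length - (i + 1)) % lp.length) % lp.length = kb := by
    have e1 : (kb + lp.length - (i + 1)) % lp.length ≡ kb + lp.length - (i + 1) [MOD lp.length] :=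
      Nat.mod_modEq _ lp.length
    have e2 : i + 1 + (kb + lp.length - (i + 1)) % lp.length
        ≡ i + 1 + (kb + lp.length - (i + 1)) [MOD lp.length] :=
      (Nat.ModEq.refl (i + 1)).add e1
    have e3 : i + 1 + (kb + lp.length - (i + 1)) = kb + lp.length := by omega
    calc (i + 1 + (kb + lp.length - (i + 1)) % lp.length) % lp.length
        = (i + 1 + (kb + lp.length - (i + 1))) % lp.length := e2
      _ = (kb + lp.length) % lp.length := by rw [e3]
      _ = kb % lp.length := Nat.add_mod_right kb lp.length
      _ = kb := Nat.mod_eq_of_lt hkb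
  have hgot : (lp.drop (i + 1) ++ lp.take (i + 1))[(kb + lp.length - (i + 1)) % lp.length]'(by simp; omega)
      = lp[kb] := by
    rw [pvRotGet lp i _ hi hjlt]
    simp only [hback]
  have hfind : (lp.drop (i + 1) ++ lp.take (i + 1)).find? (fun p => vp.contains p)
      = some ((lp.drop (i + 1) ++ lp.take (i + 1))[(kb + lp.length - (i + 1)) % lp.length]'(by simp; omega)) := by
    apply pvFind_of_least _ _ _ (by simp; omega)
    · rw [hgot]; exact hvalb
    · intro j hj hjj
      have hjn : j < lp.length := by simp at hj; omega
      by_contra hc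
      rw [Bool.not_eq_false, pvRotGet lp i j hi hjn] at hc
      have hmmem : (((i + 1 + j) % lp.length : Nat) : Int) ∈ pvVidx lp vp :=
        (pvMem_vidx lp vp _).mpr ⟨(i + 1 + j) % lp.length, Nat.mod_lt _ hn, rfl, hc⟩
      have hle := hminle _ hmmem
      simp only [pvKey_eval lp.length kb i hi hkb,
        pvKey_eval lp.length ((i + 1 + j) % lp.length) i hi (Nat.mod_lt _ hn)] at hle
      -- key of (i+1+j)%n equals j
      have hkeyj : ((i + 1 + j) % lp.length + lp.length - (i + 1)) % lp.length = j := by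
        have e1 : (i + 1 + j) % lp.length + (lp.length - (i + 1))
            ≡ (i + 1 + j) + (lp.length - (i + 1)) [MOD lp.length] :=
          (Nat.mod_modEq _ lp.length).add_right _
        have e2 : (i + 1 + j) % lp.length + lp.length - (i + 1)
            = (i + 1 + j) % lp.length + (lp.length - (i + 1)) := by
          have := Nat.mod_lt (i + 1 + j) hn
          omega
        have e3 : (i + 1 + j) + (lp.length - (i + 1)) = j + lp.length := by omega
        calc ((i + 1 + j) % lp.length + lp.length - (i + 1)) % lp.length
            = ((i + 1 + j) % lp.length + (lp.length - (i + 1))) % lp.length := by rw [e2]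
          _ = ((i + 1 + j) + (lp.length - (i + 1))) % lp.length := e1
          _ = (j + lp.length) % lp.length := by rw [e3]
          _ = j % lp.length := Nat.add_mod_right j lp.length
          _ = j := Nat.mod_eq_of_lt hjn
      rw [hkeyj] at hle
      have hji : (kb + lp.length - (i + 1)) % lp.length ≤ j := by exact_mod_cast hle
      omega
  rw [hfind, hgot, PySem.List.pyGet?_natCast, List.getElem?_eq_getElem hkb]

-- ===== VERDICT (by name: the statement is the Claim_ definition above) =====
theorem pick_next_path_in_loop_py_spec : Claim_equal_pick_next_path_in_loop_py := by
  unfold Claim_equal_pick_next_path_in_loop_py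
  intro lp vp cp _
  unfold Spec_pick_next_path_in_loop_py pick_next_path_in_loop_py pick_next_path_in_loop_py_alt
  by_cases hnil : lp = []
  · subst hnil
    cases cp <;> simp [pvVidx, PySem.List.enumerate]
  · rw [if_neg hnil]
    have hn : 0 < lp.length := List.length_pos_iff.mpr hnil
    by_cases hv0 : pvVidx lp vp = []
    · rw [if_pos hv0]
      have hno := pvNo_valid lp vp hv0
      by_cases hmem : ((cp.map lp.contains).getD false) = false
      · rw [if_pos hmem, pvAFirst_eq_find]
        exact List.find?_eq_none.mpr (fun x hx => by simpa using hno x hx)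
      · rw [if_neg hmem]
        cases cp with
        | none => exact absurd rfl hmem
        | some c =>
          cases hidx : PySem.List.index? lp c with
          | none => simp only [hidx]
          | some i =>
            obtain ⟨hilt, -, -⟩ := PySem.List.getElem_of_index?_eq_some hidx
            simp only [hidx]
            rw [pvScan_rot0 lp vp i hilt]
            refine List.find?_eq_none.mpr (fun x hx => ?_)
            rcases List.mem_append.mp hx with h | h
            · simpa using hno x (List.mem_of_mem_drop h)
            · simpa using hno x (List.mem_of_mem_take h)
    · rw [if_neg hv0]
      obtain ⟨m, t, hmt⟩ : ∃ m t, pvVidx lp vp = m :: t := by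
        cases h : pvVidx lp vp with
        | nil => exact absurd h hv0
        | cons a b => exact ⟨a, b, rfl⟩
      cases cp with
      | none =>
        simp only [Option.map_none, Option.getD_none]
        rw [if_pos trivial, if_neg (by simp)]
        rw [pvAFirst_eq_find, pvHead_branch lp vp m t hmt, hmt]
        rfl
      | some c =>
        by_cases hmem : lp.contains c
        · have hcm : c ∈ lp := List.contains_iff_mem.mp hmem
          obtain ⟨i, hIdx⟩ := Option.isSome_iff_exists.mp
            ((PySem.List.index?_isSome_iff lp c).mpr hcm)
          obtain ⟨hilt, -, -⟩ := PySem.List.getElem_of_index?_eq_some hIdx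
          simp only [hmem, Option.map_some, Option.getD_some, hIdx]
          rw [if_pos trivial]
          cases hb : PySem.List.min? (pvVidx lp vp)
              (fun m => PySem.Int.mod (m - (i : Int) - 1) (lp.length : Int)) with
          | none => exact absurd ((PySem.List.min?_eq_none_iff _ _).mp hb) hv0
          | some b =>
            rw [pvScan_rot0 lp vp i hilt]
            exact pvMin_branch lp vp i hilt b hb
        · have hIdx : PySem.List.index? lp c = none :=
            (PySem.List.index?_eq_none_iff lp c).mpr
              (fun h => hmem (List.contains_iff_mem.mpr h))
          rw [Bool.not_eq_true] at hmem
          simp only [hmem, Option.map_some, Option.getD_some]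
          rw [if_pos trivial, if_neg (by simp)]
          rw [pvAFirst_eq_find, pvHead_branch lp vp m t hmt, hmt]
          rfl
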